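-- pv_equiv track=rewrite | github.com/s11214/PyQt6_Framwork_with_Proxy_Manager | src/core/proxy/proxy_source/import_source.py | _is_country_match
-- ===== SOURCE A (Python) =====
-- def _is_country_match(proxy_country: str, target_iso: str) -> bool:
--     """检查代理的国家/地区是否与目标国家/地区匹配
--
--     Args:
--         proxy_country: 代理的国家/地区代码
--         target_iso: 目标国家/地区代码
--
--     Returns:
--         bool: 是否匹配
--     """
--     # 标准化国家/地区代码
--     proxy_country = proxy_country.upper()
--     target_iso = target_iso.upper()
--
--     # 直接相等时匹配
--     if proxy_country == target_iso:
--         return True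
--
--     # 特殊处理中国大陆与港澳台地区
--     # 如果目标是中国大陆(CN)，检测到的是港澳台(HK/TW/MO)，则不匹配
--     if target_iso == 'CN' and proxy_country in ['HK', 'TW', 'MO']:
--         return False
--
--     # 如果目标是港澳台(HK/TW/MO)，检测到的是中国大陆(CN)，则不匹配
--     if target_iso in ['HK', 'TW', 'MO'] and proxy_country == 'CN':
--         return False
--
--     # 其他情况，考虑简单的别名匹配
--     country_aliases = {
--         'CN': ['CHINA', 'MAINLAND', 'ZHONGGUO'],
--         'US': ['USA', 'AMERICA', 'UNITED STATES'],
--         'GB': ['UK', 'UNITED KINGDOM', 'ENGLAND'],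
--         'HK': ['HONG KONG', 'HONGKONG'],
--         'TW': ['TAIWAN'],
--         'MO': ['MACAO', 'MACAU']
--     }
--
--     # 检查代理国家是否在目标国家的别名列表中
--     if target_iso in country_aliases and proxy_country in country_aliases[target_iso]:
--         return True
--
--     # 反向检查目标国家是否在代理国家的别名列表中
--     for code, aliases in country_aliases.items():
--         if proxy_country == code and target_iso in aliases:
--             return True
--
--     return False
-- ===== SOURCE B (Python) =====
-- _ALIAS_TO_CODE = {
--     'CHINA': 'CN', 'MAINLAND': 'CN', 'ZHONGGUO': 'CN',
--     'USA': 'US', 'AMERICA': 'US', 'UNITED STATES': 'US',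
--     'UK': 'GB', 'UNITED KINGDOM': 'GB', 'ENGLAND': 'GB',
--     'HONG KONG': 'HK', 'HONGKONG': 'HK',
--     'TAIWAN': 'TW',
--     'MACAO': 'MO', 'MACAU': 'MO',
-- }
--
--
-- def _is_country_match(proxy_country: str, target_iso: str) -> bool:
--     p = proxy_country.upper()
--     t = target_iso.upper()
--     return p == t or _ALIAS_TO_CODE.get(p) == t or _ALIAS_TO_CODE.get(t) == p
-- ===== Notes on version B (the rewrite author's own statement) =====
-- stated objective: simpler
-- what changed: Replaced the forward dict-of-lists membership test, the reverse items() loop and the two redundant CN/HK/TW/MO guard branches with one pre-built inverted alias->code map and three flat comparisons (p==t, map.get(p)==t, map.get(t)==p).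
import Mathlib
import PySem

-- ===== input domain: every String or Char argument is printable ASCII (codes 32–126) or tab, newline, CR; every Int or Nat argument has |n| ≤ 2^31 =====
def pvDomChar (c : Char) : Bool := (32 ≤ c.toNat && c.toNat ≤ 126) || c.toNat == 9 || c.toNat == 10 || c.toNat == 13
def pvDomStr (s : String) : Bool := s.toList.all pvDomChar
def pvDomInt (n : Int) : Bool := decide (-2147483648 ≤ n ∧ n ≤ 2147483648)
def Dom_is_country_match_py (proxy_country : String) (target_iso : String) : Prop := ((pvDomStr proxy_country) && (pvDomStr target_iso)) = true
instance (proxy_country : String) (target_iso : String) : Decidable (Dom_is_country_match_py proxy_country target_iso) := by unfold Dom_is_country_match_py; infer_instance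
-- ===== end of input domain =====

-- B replaces A's forward dict-of-lists membership test and reverse items() loop (and the
-- redundant CN↔HK/TW/MO guard branches) by three flat lookups in one inverted alias→code map; objective: simpler.

-- ===== PORT A =====
def is_country_match_py (proxy_country : String) (target_iso : String) : Bool :=
  let proxy := PySem.Str.upper proxy_country
  let tgt := PySem.Str.upper target_iso
  if proxy == tgt then true
  else if tgt == "CN" && (["HK", "TW", "MO"].contains proxy) then false
  else if (["HK", "TW", "MO"].contains tgt) && proxy == "CN" then false
  else
    let country_aliases : PySem.Dict String (List String) :=
      PySem.Dict.ofList [("CN", ["CHINA", "MAINLAND", "ZHONGGUO"]),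
                         ("US", ["USA", "AMERICA", "UNITED STATES"]),
                         ("GB", ["UK", "UNITED KINGDOM", "ENGLAND"]),
                         ("HK", ["HONG KONG", "HONGKONG"]),
                         ("TW", ["TAIWAN"]),
                         ("MO", ["MACAO", "MACAU"])]
    if country_aliases.contains tgt &&
        (match country_aliases.get? tgt with
         | some aliases => aliases.contains proxy
         | none => false) then true
    -- 'for code, aliases in country_aliases.items(): if … return True' = any over items
    else if country_aliases.items.any (fun ca => proxy == ca.1 && ca.2.contains tgt) then true
    else false

-- ===== PORT B =====
def aliasToCode : PySem.Dict String String :=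
  PySem.Dict.ofList [("CHINA", "CN"), ("MAINLAND", "CN"), ("ZHONGGUO", "CN"),
                     ("USA", "US"), ("AMERICA", "US"), ("UNITED STATES", "US"),
                     ("UK", "GB"), ("UNITED KINGDOM", "GB"), ("ENGLAND", "GB"),
                     ("HONG KONG", "HK"), ("HONGKONG", "HK"),
                     ("TAIWAN", "TW"),
                     ("MACAO", "MO"), ("MACAU", "MO")]

def is_country_match_py_alt (proxy_country : String) (target_iso : String) : Bool :=
  let p := PySem.Str.upper proxy_country
  let t := PySem.Str.upper target_iso
  p == t || aliasToCode.get? p == some t || aliasToCode.get? t == some p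

-- ===== PRECONDITION & SPEC =====
def Spec_is_country_match_py (proxy_country : String) (target_iso : String) (out : Bool) : Prop := out = is_country_match_py_alt proxy_country target_iso
instance (proxy_country : String) (target_iso : String) (out : Bool) : Decidable (Spec_is_country_match_py proxy_country target_iso out) := by unfold Spec_is_country_match_py; infer_instance

-- ===== CLAIM (what is proved, stated in full; the proofs are below) =====
def Claim_equal_is_country_match_py : Prop := ∀ (proxy_country : String) (target_iso : String), Dom_is_country_match_py proxy_country target_iso → Spec_is_country_match_py proxy_country target_iso (is_country_match_py proxy_country target_iso)

-- ===== LEMMAS AND PROOFS =====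

-- the only strings either implementation ever compares its (uppercased) arguments against
def pvRelevant : List String :=
  ["CN", "US", "GB", "HK", "TW", "MO",
   "CHINA", "MAINLAND", "ZHONGGUO", "USA", "AMERICA", "UNITED STATES",
   "UK", "UNITED KINGDOM", "ENGLAND", "HONG KONG", "HONGKONG", "TAIWAN", "MACAO", "MACAU"]

-- ===== VERDICT (by name: the statement is the Claim_ definition above) =====
theorem is_country_match_py_spec : Claim_equal_is_country_match_py := by
  intro proxy_country target_iso _
  unfold Spec_is_country_match_py is_country_match_py is_country_match_py_alt
  rw [show (PySem.Dict.ofList [("CN", ["CHINA", "MAINLAND", "ZHONGGUO"]),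
                         ("US", ["USA", "AMERICA", "UNITED STATES"]),
                         ("GB", ["UK", "UNITED KINGDOM", "ENGLAND"]),
                         ("HK", ["HONG KONG", "HONGKONG"]),
                         ("TW", ["TAIWAN"]),
                         ("MO", ["MACAO", "MACAU"])] : PySem.Dict String (List String)) =
      PySem.Dict.mk [("CN", ["CHINA", "MAINLAND", "ZHONGGUO"]),
                         ("US", ["USA", "AMERICA", "UNITED STATES"]),
                         ("GB", ["UK", "UNITED KINGDOM", "ENGLAND"]),
                         ("HK", ["HONG KONG", "HONGKONG"]),
                         ("TW", ["TAIWAN"]),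
                         ("MO", ["MACAO", "MACAU"])] from rfl,
      show aliasToCode = PySem.Dict.mk [("CHINA", "CN"), ("MAINLAND", "CN"), ("ZHONGGUO", "CN"),
                     ("USA", "US"), ("AMERICA", "US"), ("UNITED STATES", "US"),
                     ("UK", "GB"), ("UNITED KINGDOM", "GB"), ("ENGLAND", "GB"),
                     ("HONG KONG", "HK"), ("HONGKONG", "HK"),
                     ("TAIWAN", "TW"),
                     ("MACAO", "MO"), ("MACAU", "MO")] from rfl]
  generalize PySem.Str.upper proxy_country = p
  generalize PySem.Str.upper target_iso = t
  by_cases hpt : p = t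
  · subst hpt; simp
  by_cases hp : p ∈ pvRelevant <;> by_cases ht : t ∈ pvRelevant
  · fin_cases hp <;> fin_cases ht <;> decide
  · simp only [pvRelevant, List.mem_cons, List.not_mem_nil, or_false, not_or] at ht
    obtain ⟨t1, t2, t3, t4, t5, t6, t7, t8, t9, t10, t11, t12, t13, t14, t15, t16, t17, t18, t19, t20⟩ := ht
    fin_cases hp <;>
      simp [hpt, Ne.symm hpt, PySem.Dict.get?, PySem.Dict.contains,
        t1, t2, t3, t4, t5, t6, t7, t8, t9, t10, t11, t12, t13, t14, t15, t16, t17, t18, t19, t20,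
        Ne.symm t1, Ne.symm t2, Ne.symm t3, Ne.symm t4, Ne.symm t5, Ne.symm t6, Ne.symm t7,
        Ne.symm t8, Ne.symm t9, Ne.symm t10, Ne.symm t11, Ne.symm t12, Ne.symm t13, Ne.symm t14,
        Ne.symm t15, Ne.symm t16, Ne.symm t17, Ne.symm t18, Ne.symm t19, Ne.symm t20]
  · simp only [pvRelevant, List.mem_cons, List.not_mem_nil, or_false, not_or] at hp
    obtain ⟨p1, p2, p3, p4, p5, p6, p7, p8, p9, p10, p11, p12, p13, p14, p15, p16, p17, p18, p19, p20⟩ := hp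
    fin_cases ht <;>
      simp [hpt, Ne.symm hpt, PySem.Dict.get?, PySem.Dict.contains,
        p1, p2, p3, p4, p5, p6, p7, p8, p9, p10, p11, p12, p13, p14, p15, p16, p17, p18, p19, p20,
        Ne.symm p1, Ne.symm p2, Ne.symm p3, Ne.symm p4, Ne.symm p5, Ne.symm p6, Ne.symm p7,
        Ne.symm p8, Ne.symm p9, Ne.symm p10, Ne.symm p11, Ne.symm p12, Ne.symm p13, Ne.symm p14,
        Ne.symm p15, Ne.symm p16, Ne.symm p17, Ne.symm p18, Ne.symm p19, Ne.symm p20]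
  · simp only [pvRelevant, List.mem_cons, List.not_mem_nil, or_false, not_or] at hp ht
    obtain ⟨p1, p2, p3, p4, p5, p6, p7, p8, p9, p10, p11, p12, p13, p14, p15, p16, p17, p18, p19, p20⟩ := hp
    obtain ⟨t1, t2, t3, t4, t5, t6, t7, t8, t9, t10, t11, t12, t13, t14, t15, t16, t17, t18, t19, t20⟩ := ht
    simp [hpt, Ne.symm hpt, PySem.Dict.get?, PySem.Dict.contains,
      p1, p2, p3, p4, p5, p6, Ne.symm p1, Ne.symm p2, Ne.symm p3, Ne.symm p4, Ne.symm p5, Ne.symm p6,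
      t1, t2, t3, t4, t5, t6, t7, t8, t9, t10, t11, t12, t13, t14, t15, t16, t17, t18, t19, t20,
      Ne.symm t1, Ne.symm t2, Ne.symm t3, Ne.symm t4, Ne.symm t5, Ne.symm t6, Ne.symm t7,
      Ne.symm t8, Ne.symm t9, Ne.symm t10, Ne.symm t11, Ne.symm t12, Ne.symm t13, Ne.symm t14,
      Ne.symm t15, Ne.symm t16, Ne.symm t17, Ne.symm t18, Ne.symm t19, Ne.symm t20]
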